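-- pv_equiv track=rewrite | github.com/gribgp/LearnPython | Lesson4/dkzhang/theTest.py | statisticsElement_niu
-- ===== SOURCE A (Python) =====
-- def statisticsElement_niu(strs):
--     D = dict.fromkeys(
--         ['a', 'b', 'c', 'd', 'e', 'f', 'g', 'h', 'i', 'j', 'k', 'l', 'm', 'n', 'o', 'p', 'q', 'r', 's', 't', 'u', 'v',
--          'w', 'x', 'y', 'z'], 0)
--     for word in D:
--         for m in range(len(strs)):
--             D[word] += strs[m].count(word)
--     return D
-- ===== SOURCE B (Python) =====
-- def statisticsElement_niu(strs):
--     D = dict.fromkeys('abcdefghijklmnopqrstuvwxyz', 0)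
--     for word in strs:
--         for ch in word:
--             if ch in D:
--                 D[ch] += 1
--     return D
-- ===== Notes on version B (the rewrite author's own statement) =====
-- stated objective: faster
-- what changed: A rescans the whole string list 26 times (once per letter, each scan calling str.count); B preseeds the 26-key table and makes a single pass over the characters, incrementing the matching entry.
import Mathlib
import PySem

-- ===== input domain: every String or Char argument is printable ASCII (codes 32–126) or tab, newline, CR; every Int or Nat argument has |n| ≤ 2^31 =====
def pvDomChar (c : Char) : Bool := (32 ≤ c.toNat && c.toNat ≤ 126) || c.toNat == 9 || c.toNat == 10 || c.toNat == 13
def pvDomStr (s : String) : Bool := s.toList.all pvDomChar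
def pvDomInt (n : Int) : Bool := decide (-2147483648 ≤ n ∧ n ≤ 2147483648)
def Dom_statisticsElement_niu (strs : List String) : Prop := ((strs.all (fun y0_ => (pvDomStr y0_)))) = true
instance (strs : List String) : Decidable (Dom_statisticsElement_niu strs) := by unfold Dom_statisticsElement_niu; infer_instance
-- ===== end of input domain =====

-- B replaces A's 26 passes over the string list (one str.count scan per letter) by a single
-- pass over all characters that increments the preseeded 26-entry table; measured faster by a constant factor.


-- ===== PORT A =====
def pvLettersA : List String :=
  ["a","b","c","d","e","f","g","h","i","j","k","l","m","n","o","p","q","r","s","t","u","v","w","x","y","z"]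

def statisticsElement_niu (strs : List String) : List (String × Int) :=
  let D0 : PySem.Dict String Int := PySem.Dict.ofList (pvLettersA.map (fun k => (k, (0 : Int))))
  -- 'for word in D' iterates the dict's keys; the loop body only overwrites values, so the keys never change
  let D := D0.keys.foldl (fun D word =>
      (PySem.List.pyRange 0 (PySem.List.len strs)).foldl (fun D m =>
        -- strs[m]: m is always in range here, so pyGetD with a dummy default is exact
        D.insert word (D.getD word 0 + (PySem.Str.count (PySem.List.pyGetD strs m "") word : Int))) D) D0
  D.items

-- ===== PORT B =====
def statisticsElement_niu_alt (strs : List String) : List (String × Int) :=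
  -- dict.fromkeys('abc…z', 0): one key per character of the literal
  let D0 : PySem.Dict String Int :=
    PySem.Dict.ofList (("abcdefghijklmnopqrstuvwxyz".toList).map (fun c => (String.ofList [c], (0 : Int))))
  let D := strs.foldl (fun D word =>
      word.toList.foldl (fun D ch =>
        if D.contains (String.ofList [ch]) then
          D.insert (String.ofList [ch]) (D.getD (String.ofList [ch]) 0 + 1)
        else D) D) D0
  D.items

-- ===== PRECONDITION & SPEC =====
def Spec_statisticsElement_niu (strs : List String) (out : List (String × Int)) : Prop := out = statisticsElement_niu_alt strs
instance (strs : List String) (out : List (String × Int)) : Decidable (Spec_statisticsElement_niu strs out) := by unfold Spec_statisticsElement_niu; infer_instance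

-- ===== CLAIM (what is proved, stated in full; the proofs are below) =====
def Claim_equal_statisticsElement_niu : Prop := ∀ (strs : List String), Dom_statisticsElement_niu strs → Spec_statisticsElement_niu strs (statisticsElement_niu strs)

-- ===== LEMMAS AND PROOFS =====
def pvAZ : List Char := "abcdefghijklmnopqrstuvwxyz".toList

def pvD0 : PySem.Dict String Int := PySem.Dict.ofList (pvLettersA.map (fun k => (k, (0 : Int))))

def pvD0B : PySem.Dict String Int :=
  PySem.Dict.ofList (("abcdefghijklmnopqrstuvwxyz".toList).map (fun c => (String.ofList [c], (0 : Int))))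

theorem pv_keys_D0 : pvD0.keys = pvLettersA := by decide

theorem pv_keys_D0B : pvD0B.keys = pvLettersA := by decide

theorem pv_letters_eq : pvLettersA = pvAZ.map (fun c => String.ofList [c]) := by decide

theorem pv_getD0 : ∀ k ∈ pvLettersA, pvD0.getD k 0 = 0 := by decide

theorem pv_getD0B : ∀ k ∈ pvLettersA, pvD0B.getD k 0 = 0 := by decide

theorem pv_contains_D0 : ∀ k ∈ pvLettersA, pvD0.contains k = true := by decide

theorem pv_nodup_letters : pvLettersA.Nodup := by decide

theorem pv_ofList_single_inj (c x : Char) : String.ofList [c] = String.ofList [x] ↔ c = x := by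
  constructor
  · intro h; have := congrArg String.toList h; simpa using this
  · intro h; rw [h]

-- str.count with a one-character needle counts the occurrences of that character
theorem pv_count_go_singleton (c : Char) (cs : List Char) (fuel acc : Nat) (h : cs.length ≤ fuel) :
    PySem.Chars.count.go [c] fuel cs acc = acc + cs.count c := by
  induction cs generalizing fuel acc with
  | nil => cases fuel <;> simp [PySem.Chars.count.go]
  | cons a t ih =>
    cases fuel with
    | zero => simp at h
    | succ n =>
      rw [PySem.Chars.count.go]
      by_cases hca : c = a
      · subst hca
        simp only [List.isPrefixOf, BEq.rfl, Bool.true_and, if_true, List.length_singleton,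
          List.drop_one, List.tail_cons]
        rw [ih _ _ (by simpa using h)]
        simp
        omega
      · simp only [List.isPrefixOf, Bool.and_true]
        rw [if_neg (by simp [hca])]
        rw [ih _ _ (by simpa using h)]
        simp [Ne.symm hca]

theorem pv_count_singleton (s : String) (c : Char) :
    PySem.Str.count s (String.ofList [c]) = s.toList.count c := by
  rw [PySem.Str.count_eq]
  have h1 : (String.ofList [c]).toList = [c] := by simp
  rw [h1, PySem.Chars.count, if_neg (by simp)]
  simpa using pv_count_go_singleton c s.toList s.toList.length 0 le_rfl

-- A's inner loop: repeated getD/insert at the single key w accumulates a sum there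
theorem pvA_inner_getD (l : List String) (w : String) (g : String → Int)
    (D : PySem.Dict String Int) (k : String) :
    (l.foldl (fun D s => D.insert w (D.getD w 0 + g s)) D).getD k 0
      = if k = w then D.getD k 0 + (l.map g).sum else D.getD k 0 := by
  induction l generalizing D with
  | nil => simp
  | cons s t ih =>
    simp only [List.foldl_cons, ih, PySem.Dict.getD_insert, List.map_cons, List.sum_cons]
    by_cases hkw : k = w
    · subst hkw; simp; ring
    · simp [hkw]

theorem pvA_inner_keys (l : List String) (w : String) (g : String → Int)
    (D : PySem.Dict String Int) (hw : D.contains w = true) :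
    (l.foldl (fun D s => D.insert w (D.getD w 0 + g s)) D).keys = D.keys := by
  induction l generalizing D with
  | nil => rfl
  | cons s t ih =>
    simp only [List.foldl_cons]
    rw [ih _ (by simp), PySem.Dict.keys_insert_of_contains _ _ hw]

theorem pvA_outer_getD_not_mem (ws : List String) (l : List String) (g : String → String → Int)
    (D : PySem.Dict String Int) (k : String) (hk : k ∉ ws) :
    (ws.foldl (fun D w => l.foldl (fun D s => D.insert w (D.getD w 0 + g w s)) D) D).getD k 0
      = D.getD k 0 := by
  induction ws generalizing D with
  | nil => rfl
  | cons w ws ih =>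
    simp only [List.foldl_cons]
    rw [ih _ (by simp at hk; exact hk.2), pvA_inner_getD, if_neg (by simp at hk; exact hk.1)]

theorem pvA_outer_getD (ws : List String) (hnd : ws.Nodup) (l : List String) (g : String → String → Int)
    (D : PySem.Dict String Int) (k : String) (hk : k ∈ ws) :
    (ws.foldl (fun D w => l.foldl (fun D s => D.insert w (D.getD w 0 + g w s)) D) D).getD k 0
      = D.getD k 0 + (l.map (g k)).sum := by
  induction ws generalizing D with
  | nil => cases hk
  | cons w ws ih =>
    simp only [List.foldl_cons]
    by_cases hkw : k = w
    · subst hkw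
      rw [pvA_outer_getD_not_mem _ _ _ _ _ (by simpa using (List.nodup_cons.mp hnd).1),
        pvA_inner_getD, if_pos rfl]
    · rw [ih (List.nodup_cons.mp hnd).2 _ (by rcases List.mem_cons.mp hk with h | h; exact absurd h hkw; exact h),
        pvA_inner_getD, if_neg hkw]

theorem pvA_outer_keys (ws : List String) (l : List String) (g : String → String → Int)
    (D : PySem.Dict String Int) (hc : ∀ w ∈ ws, D.contains w = true) :
    (ws.foldl (fun D w => l.foldl (fun D s => D.insert w (D.getD w 0 + g w s)) D) D).keys = D.keys := by
  induction ws generalizing D with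
  | nil => rfl
  | cons w ws ih =>
    simp only [List.foldl_cons]
    have hkeys := pvA_inner_keys l w (g w) D (hc w (by simp))
    rw [ih _ (fun w' hw' => by
      rw [PySem.Dict.contains_iff_mem_keys, hkeys, ← PySem.Dict.contains_iff_mem_keys]
      exact hc w' (by simp [hw'])), hkeys]

-- B's character loop: only the (already present) key of the current letter changes
theorem pvB_word_keys (cs : List Char) (D : PySem.Dict String Int) :
    (cs.foldl (fun D ch =>
        if D.contains (String.ofList [ch]) then
          D.insert (String.ofList [ch]) (D.getD (String.ofList [ch]) 0 + 1)
        else D) D).keys = D.keys := by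
  induction cs generalizing D with
  | nil => rfl
  | cons c t ih =>
    simp only [List.foldl_cons]
    by_cases hc : D.contains (String.ofList [c]) = true
    · rw [if_pos hc, ih, PySem.Dict.keys_insert_of_contains _ _ hc]
    · rw [if_neg hc, ih]

theorem pvB_word_getD (cs : List Char) (D : PySem.Dict String Int) (x : Char)
    (hk : D.contains (String.ofList [x]) = true) :
    (cs.foldl (fun D ch =>
        if D.contains (String.ofList [ch]) then
          D.insert (String.ofList [ch]) (D.getD (String.ofList [ch]) 0 + 1)
        else D) D).getD (String.ofList [x]) 0
      = D.getD (String.ofList [x]) 0 + (cs.count x : Int) := by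
  induction cs generalizing D with
  | nil => simp
  | cons c t ih =>
    simp only [List.foldl_cons]
    by_cases hcx : c = x
    · subst hcx
      rw [if_pos hk, ih _ (by simp),
        PySem.Dict.getD_insert_self]
      simp
      ring
    · have hne : String.ofList [x] ≠ String.ofList [c] := by
        simp [pv_ofList_single_inj]; exact fun h => hcx h.symm
      by_cases hc : D.contains (String.ofList [c]) = true
      · rw [if_pos hc, ih _ (by simp [PySem.Dict.contains_insert, hk]),
          PySem.Dict.getD_insert_of_ne _ _ _ hne]
        simp [hcx]
      · rw [if_neg hc, ih _ hk]
        simp [hcx]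

theorem pvB_outer_keys (ws : List String) (D : PySem.Dict String Int) :
    (ws.foldl (fun D word => word.toList.foldl (fun D ch =>
        if D.contains (String.ofList [ch]) then
          D.insert (String.ofList [ch]) (D.getD (String.ofList [ch]) 0 + 1)
        else D) D) D).keys = D.keys := by
  induction ws generalizing D with
  | nil => rfl
  | cons w ws ih => simp only [List.foldl_cons]; rw [ih, pvB_word_keys]

theorem pvB_outer_getD (ws : List String) (D : PySem.Dict String Int) (x : Char)
    (hk : D.contains (String.ofList [x]) = true) :
    (ws.foldl (fun D word => word.toList.foldl (fun D ch =>
        if D.contains (String.ofList [ch]) then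
          D.insert (String.ofList [ch]) (D.getD (String.ofList [ch]) 0 + 1)
        else D) D) D).getD (String.ofList [x]) 0
      = D.getD (String.ofList [x]) 0 + (ws.map (fun w => (w.toList.count x : Int))).sum := by
  induction ws generalizing D with
  | nil => simp
  | cons w ws ih =>
    simp only [List.foldl_cons]
    have hk' : (w.toList.foldl (fun D ch =>
        if D.contains (String.ofList [ch]) then
          D.insert (String.ofList [ch]) (D.getD (String.ofList [ch]) 0 + 1)
        else D) D).contains (String.ofList [x]) = true := by
      rw [PySem.Dict.contains_iff_mem_keys, pvB_word_keys, ← PySem.Dict.contains_iff_mem_keys]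
      exact hk
    rw [ih _ hk', pvB_word_getD _ _ _ hk]
    simp
    ring

-- ===== VERDICT (by name: the statement is the Claim_ definition above) =====
theorem statisticsElement_niu_spec : Claim_equal_statisticsElement_niu := by
  intro strs _
  unfold Spec_statisticsElement_niu
  show (let D0 : PySem.Dict String Int := PySem.Dict.ofList (pvLettersA.map (fun k => (k, (0 : Int))))
    let D := D0.keys.foldl (fun D word =>
      (PySem.List.pyRange 0 (PySem.List.len strs)).foldl (fun D m =>
        D.insert word (D.getD word 0 + (PySem.Str.count (PySem.List.pyGetD strs m "") word : Int))) D) D0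
    D.items) = _
  simp only [statisticsElement_niu_alt]
  rw [show PySem.Dict.ofList (pvLettersA.map (fun k => (k, (0 : Int)))) = pvD0 from rfl,
    show PySem.Dict.ofList (("abcdefghijklmnopqrstuvwxyz".toList).map (fun c => (String.ofList [c], (0 : Int)))) = pvD0B from rfl,
    pv_keys_D0]
  -- turn A's indexed inner loop into a direct loop over strs
  have hinner : ∀ (D : PySem.Dict String Int) (w : String), w ∈ pvLettersA →
      (PySem.List.pyRange 0 (PySem.List.len strs)).foldl (fun D m =>
        D.insert w (D.getD w 0 + (PySem.Str.count (PySem.List.pyGetD strs m "") w : Int))) D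
      = strs.foldl (fun D s => D.insert w (D.getD w 0 + (PySem.Str.count s w : Int))) D := by
    intro D w _
    rw [PySem.List.foldl_pyRange_pyGetD strs ""
      (fun D s => D.insert w (D.getD w 0 + (PySem.Str.count s w : Int))) D (by norm_num)]
    simp
  rw [PySem.List.foldl_congr_mem _ _ _ _ (fun D w hw => hinner D w hw)]
  -- both results as maps over the (unchanged) key list
  have hkeysA : (pvLettersA.foldl (fun D w =>
      strs.foldl (fun D s => D.insert w (D.getD w 0 + (PySem.Str.count s w : Int))) D) pvD0).keys
      = pvLettersA := by
    rw [pvA_outer_keys _ _ _ _ pv_contains_D0, pv_keys_D0]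
  have hkeysB : (strs.foldl (fun D word => word.toList.foldl (fun D ch =>
      if D.contains (String.ofList [ch]) then
        D.insert (String.ofList [ch]) (D.getD (String.ofList [ch]) 0 + 1)
      else D) D) pvD0B).keys = pvLettersA := by
    rw [pvB_outer_keys, pv_keys_D0B]
  rw [PySem.Dict.items_eq_map_keys _ (by rw [hkeysA]; exact pv_nodup_letters) (0 : Int),
    PySem.Dict.items_eq_map_keys _ (by rw [hkeysB]; exact pv_nodup_letters) (0 : Int),
    hkeysA, hkeysB]
  refine List.map_congr_left (fun k hk => ?_)
  obtain ⟨c, -, rfl⟩ := List.mem_map.mp (pv_letters_eq ▸ hk)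
  have hvA := pvA_outer_getD pvLettersA pv_nodup_letters strs
    (fun w s => (PySem.Str.count s w : Int)) pvD0 _ hk
  have hvB := pvB_outer_getD strs pvD0B c
    (by rw [PySem.Dict.contains_iff_mem_keys, pv_keys_D0B]; exact hk)
  rw [hvA, hvB, pv_getD0 _ hk, pv_getD0B _ hk]
  simp only [pv_count_singleton]
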